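-- pv_equiv track=rewrite | github.com/k-acdm/mykt-eitango | scripts/generate_kiso_questions/rank_07_expr_grade2.py | _resolve_band_c_subkind
-- ===== SOURCE A (Python) =====
-- from typing import Any, Dict, List, Tuple
--
-- _BAND_C_PATTERN_ORDER = ["power", "mono_mul", "mono_div"]
--
-- def _resolve_band_c_subkind(slot_index: int, subcounts: Dict[str, int]) -> str:
--     """slot_index → subkind の決定論的 dispatch。
--
--     例: subcounts={"power":5, "mono_mul":6, "mono_div":5}
--         slot 0-4   → "power"
--         slot 5-10  → "mono_mul"
--         slot 11-15 → "mono_div"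
--     """
--     boundary = 0
--     for kind in _BAND_C_PATTERN_ORDER:
--         boundary += int(subcounts.get(kind, 0))
--         if slot_index < boundary:
--             return kind
--     raise ValueError(
--         f"slot_index {slot_index} が subcounts {subcounts} の範囲外。"
--         f"band_config の count と subcounts の総和が一致しているか確認"
--     )
-- ===== SOURCE B (Python) =====
-- _BAND_C_PATTERN_ORDER = ["power", "mono_mul", "mono_div"]
--
-- def _resolve_band_c_subkind(slot_index, subcounts):
--     """Build the cumulative-boundary table once, then locate the slot with a
--     binary search (bisect_right, written out since we import nothing)."""
--     cumulative = []
--     total = 0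
--     for kind in _BAND_C_PATTERN_ORDER:
--         total += int(subcounts.get(kind, 0))
--         cumulative.append(total)
--     lo, hi = 0, len(cumulative)
--     while lo < hi:
--         mid = (lo + hi) // 2
--         if cumulative[mid] <= slot_index:
--             lo = mid + 1
--         else:
--             hi = mid
--     if lo < len(_BAND_C_PATTERN_ORDER):
--         return _BAND_C_PATTERN_ORDER[lo]
--     raise ValueError(
--         f"slot_index {slot_index} が subcounts {subcounts} の範囲外。"
--         f"band_config の count と subcounts の総和が一致しているか確認"
--     )
-- ===== Notes on version B (the rewrite author's own statement) =====
-- stated objective: alternative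
-- what changed: A scans the pattern order accumulating a running boundary and returns at the first boundary exceeding slot_index; B first materialises the cumulative-boundary table and then locates the slot with a bisect_right-style binary search over that table.
-- outside the precondition, e.g. on _resolve_band_c_subkind(1, {'power': 2, 'mono_mul': -2, 'mono_div': 3}): A returns 'power', B returns 'mono_div'
import Mathlib
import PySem

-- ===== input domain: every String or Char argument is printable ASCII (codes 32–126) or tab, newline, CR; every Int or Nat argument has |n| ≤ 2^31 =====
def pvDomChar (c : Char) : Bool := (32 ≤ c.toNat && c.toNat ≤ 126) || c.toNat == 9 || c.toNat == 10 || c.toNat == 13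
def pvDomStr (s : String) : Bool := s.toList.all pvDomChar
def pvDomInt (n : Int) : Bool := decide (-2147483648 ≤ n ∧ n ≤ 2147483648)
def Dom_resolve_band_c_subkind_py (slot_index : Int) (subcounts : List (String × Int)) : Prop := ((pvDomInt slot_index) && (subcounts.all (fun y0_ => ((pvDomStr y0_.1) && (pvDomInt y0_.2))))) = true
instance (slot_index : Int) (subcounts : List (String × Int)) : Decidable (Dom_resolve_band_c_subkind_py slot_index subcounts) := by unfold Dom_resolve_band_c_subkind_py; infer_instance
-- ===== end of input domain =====

-- B replaces A's accumulate-and-test scan by a cumulative-boundary table plus a binary-search lookup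
-- (alternative structure, same exact result on the stated domain).


-- ===== PORT A =====
-- _BAND_C_PATTERN_ORDER
def pvBandOrder : List String := ["power", "mono_mul", "mono_div"]

-- A's loop: running boundary, return the first kind whose boundary exceeds slot_index.
-- "" stands for the ValueError branch (excluded by Pre_).
def pvALoop (slot_index : Int) (subcounts : List (String × Int)) : Int → List String → String
  | _, [] => ""
  | boundary, kind :: rest =>
    let boundary' := boundary + (PySem.Dict.mk subcounts).getD kind 0
    if slot_index < boundary' then kind else pvALoop slot_index subcounts boundary' rest

def resolve_band_c_subkind_py (slot_index : Int) (subcounts : List (String × Int)) : String :=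
  pvALoop slot_index subcounts 0 pvBandOrder

-- ===== PORT B =====
-- B's first loop: build the cumulative boundary table.
def pvCumLoop (subcounts : List (String × Int)) : Int → List String → List Int
  | _, [] => []
  | total, kind :: rest =>
    let total' := total + (PySem.Dict.mk subcounts).getD kind 0
    total' :: pvCumLoop subcounts total' rest

-- B's while loop (hand-written bisect_right); fuel only bounds the iterations, it is never reached.
def pvBsearch (cum : List Int) (x : Int) : Nat → Nat → Nat → Nat
  | 0, lo, _ => lo
  | fuel + 1, lo, hi =>
    if lo < hi then
      let mid := (lo + hi) / 2
      if cum.getD mid 0 ≤ x then pvBsearch cum x fuel (mid + 1) hi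
      else pvBsearch cum x fuel lo mid
    else lo

def resolve_band_c_subkind_py_alt (slot_index : Int) (subcounts : List (String × Int)) : String :=
  let cumulative := pvCumLoop subcounts 0 pvBandOrder
  let lo := pvBsearch cumulative slot_index cumulative.length 0 cumulative.length
  if lo < pvBandOrder.length then pvBandOrder.getD lo "" else ""

-- ===== PRECONDITION & SPEC =====
-- Pre_ excludes the inputs on which A raises ValueError (slot_index at or beyond the total count) and
-- subcounts carrying a negative count for one of the three kinds — outside the natural domain of counts,
-- where A's scan over non-monotone boundaries returns accidental values a binary search cannot share.
def Pre_resolve_band_c_subkind_py (slot_index : Int) (subcounts : List (String × Int)) : Prop :=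
  0 ≤ (PySem.Dict.mk subcounts).getD "power" 0 ∧
  0 ≤ (PySem.Dict.mk subcounts).getD "mono_mul" 0 ∧
  0 ≤ (PySem.Dict.mk subcounts).getD "mono_div" 0 ∧
  slot_index < (PySem.Dict.mk subcounts).getD "power" 0 +
    (PySem.Dict.mk subcounts).getD "mono_mul" 0 + (PySem.Dict.mk subcounts).getD "mono_div" 0
instance (slot_index : Int) (subcounts : List (String × Int)) : Decidable (Pre_resolve_band_c_subkind_py slot_index subcounts) := by unfold Pre_resolve_band_c_subkind_py; infer_instance

def pvWitness_resolve_band_c_subkind_py : Int × (List (String × Int)) := (0, [("power", 1)])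

def Spec_resolve_band_c_subkind_py (slot_index : Int) (subcounts : List (String × Int)) (out : String) : Prop := out = resolve_band_c_subkind_py_alt slot_index subcounts
instance (slot_index : Int) (subcounts : List (String × Int)) (out : String) : Decidable (Spec_resolve_band_c_subkind_py slot_index subcounts out) := by unfold Spec_resolve_band_c_subkind_py; infer_instance

-- ===== CLAIM (what is proved, stated in full; the proofs are below) =====
def Claim_equal_resolve_band_c_subkind_py : Prop := ∀ (slot_index : Int) (subcounts : List (String × Int)), Dom_resolve_band_c_subkind_py slot_index subcounts → Pre_resolve_band_c_subkind_py slot_index subcounts → Spec_resolve_band_c_subkind_py slot_index subcounts (resolve_band_c_subkind_py slot_index subcounts)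

-- ===== LEMMAS AND PROOFS =====

-- ===== VERDICT (by name: the statement is the Claim_ definition above) =====
theorem resolve_band_c_subkind_py_spec : Claim_equal_resolve_band_c_subkind_py := by
  intro slot_index subcounts _ hpre
  obtain ⟨h0, h1, h2, h3⟩ := hpre
  unfold Spec_resolve_band_c_subkind_py resolve_band_c_subkind_py resolve_band_c_subkind_py_alt
  simp only [pvBandOrder, pvALoop, pvCumLoop, pvBsearch, List.length_cons, List.length_nil,
    List.getD] at *
  norm_num
  split_ifs <;> simp_all <;> omega
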